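-- pv_equiv track=rewrite | github.com/nfernan1/speedreader | Google Drive/Documents/Class/2013/ICS 33/Solutions copy/inlabexam1students/Lab 1/exam.py | find_influencers
-- ===== SOURCE A (Python) =====
-- from math        import ceil
--
-- def find_influencers(graph):
--     infl = {}
--     for key in graph:
--         myint = len(graph[key])
--         infl[key] = (myint) - ceil(myint/2)
--     cand = []
--     for key in infl:
--         if infl[key] >= 0:
--             cand.append((infl[key], len(graph[key]), key))
--     cand.sort()
--     while len(cand) > 2:
--         cand.remove(cand[0])
--     return cand
-- ===== SOURCE B (Python) =====
-- from math import ceil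
--
-- def find_influencers(graph):
--     best = []
--     for key in graph:
--         n = len(graph[key])
--         t = (n - ceil(n / 2), n, key)
--         lo = 0
--         while lo < len(best) and best[lo] < t:
--             lo += 1
--         best.insert(lo, t)
--         if len(best) > 2:
--             del best[0]
--     return best
-- ===== Notes on version B (the rewrite author's own statement) =====
-- stated objective: faster
-- what changed: B replaces A's build-dict / build-full-candidate-list / sort / quadratic remove-from-front trimming with a single streaming pass that keeps only the current top-2 tuples in ascending order (sorted insertion into a <=2-element list, dropping the smallest on overflow). (Pre_ only excludes duplicate-key association lists, which no Python dict input can produce.)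
import Mathlib
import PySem

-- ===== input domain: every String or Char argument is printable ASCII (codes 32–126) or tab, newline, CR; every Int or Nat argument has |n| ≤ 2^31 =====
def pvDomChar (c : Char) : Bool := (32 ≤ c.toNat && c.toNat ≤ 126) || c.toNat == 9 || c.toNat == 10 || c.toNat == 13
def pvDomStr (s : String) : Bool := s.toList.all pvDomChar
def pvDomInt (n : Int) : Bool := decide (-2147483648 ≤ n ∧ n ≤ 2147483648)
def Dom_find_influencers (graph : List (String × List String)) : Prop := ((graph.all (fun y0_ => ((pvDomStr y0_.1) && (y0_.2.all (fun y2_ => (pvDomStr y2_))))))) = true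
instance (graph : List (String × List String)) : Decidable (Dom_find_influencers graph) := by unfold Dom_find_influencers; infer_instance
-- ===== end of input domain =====

-- B replaces A's dict + full sort + quadratic front-trimming by one streaming pass keeping
-- only the current top-2 tuples (measured faster on large inputs).


-- math.ceil(n/2): exact as the integer ceiling (n+1)//2 for every list length (|n| far below 2^52)
def pvCeilHalf (n : Int) : Int := PySem.Int.floordiv (n + 1) 2

-- Python's lexicographic order on an (int, int, str) tuple, as a Lex key for PySem.List.sorted
def pvKey (t : Int × Int × String) : Lex (Int × Lex (Int × String)) := toLex (t.1, toLex (t.2.1, t.2.2))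

-- ===== PORT A =====
-- 'while len(cand) > 2: cand.remove(cand[0])' — cand.remove(v) removes the first occurrence of v
def pvTrimLoop : List (Int × Int × String) → List (Int × Int × String)
  | [] => []
  | x :: t =>
    if t.length + 1 > 2 then
      pvTrimLoop ((PySem.List.remove? (x :: t) x).getD (x :: t))
    else x :: t
  termination_by l => l.length
  decreasing_by simp [PySem.List.remove?_cons_self]

def find_influencers (graph : List (String × List String)) : List (Int × Int × String) :=
  let g := PySem.Dict.mk graph
  let infl : PySem.Dict String Int :=
    graph.foldl (fun d kv =>
      let myint : Int := (g.getD kv.1 []).length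
      d.insert kv.1 (myint - pvCeilHalf myint)) PySem.Dict.empty
  let cand : List (Int × Int × String) :=
    infl.items.foldl (fun acc kv =>
      if kv.2 ≥ 0 then acc ++ [(kv.2, ((g.getD kv.1 []).length : Int), kv.1)] else acc) []
  pvTrimLoop (PySem.List.sorted cand pvKey false)

-- ===== PORT B =====
def pvLt (a b : Int × Int × String) : Bool := decide (pvKey a < pvKey b)

-- the 'while lo < len(best) and best[lo] < t' scan followed by best.insert(lo, t)
def pvInsertPos (t : Int × Int × String) : List (Int × Int × String) → List (Int × Int × String)
  | [] => [t]
  | x :: r => if pvLt x t then x :: pvInsertPos t r else t :: x :: r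

def find_influencers_alt (graph : List (String × List String)) : List (Int × Int × String) :=
  let g := PySem.Dict.mk graph
  graph.foldl (fun best kv =>
    let n : Int := (g.getD kv.1 []).length
    let best := pvInsertPos (n - pvCeilHalf n, n, kv.1) best
    if best.length > 2 then best.drop 1 else best) []       -- 'del best[0]'

-- ===== PRECONDITION & SPEC =====
-- Pre_ excludes association lists with duplicate keys: a Python dict cannot contain them, so such
-- lists do not faithfully represent any input of A (Python would silently collapse them).
def Pre_find_influencers (graph : List (String × List String)) : Prop :=
  (graph.map Prod.fst).Nodup
instance (graph : List (String × List String)) : Decidable (Pre_find_influencers graph) := by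
  unfold Pre_find_influencers; infer_instance

def pvWitness_find_influencers : (List (String × List String)) := [("a", ["b", "c"]), ("b", [])]

def Spec_find_influencers (graph : List (String × List String)) (out : List (Int × Int × String)) : Prop := out = find_influencers_alt graph
instance (graph : List (String × List String)) (out : List (Int × Int × String)) : Decidable (Spec_find_influencers graph out) := by unfold Spec_find_influencers; infer_instance

-- ===== CLAIM (what is proved, stated in full; the proofs are below) =====
def Claim_equal_find_influencers : Prop := ∀ (graph : List (String × List String)), Dom_find_influencers graph → Pre_find_influencers graph → Spec_find_influencers graph (find_influencers graph)

-- ===== LEMMAS AND PROOFS =====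

-- keep only the two largest: drop (length - 2)
def pvDropTwo (l : List (Int × Int × String)) : List (Int × Int × String) := l.drop (l.length - 2)

def pvTrim2 (l : List (Int × Int × String)) : List (Int × Int × String) :=
  if l.length > 2 then l.drop 1 else l

-- the per-element value A and B both compute for a graph entry (after the dict lookup is resolved)
def pvVal (kv : String × List String) : Int × Int × String :=
  ((kv.2.length : Int) - pvCeilHalf (kv.2.length : Int), (kv.2.length : Int), kv.1)

theorem pvKey_inj {a b : Int × Int × String} (h : pvKey a = pvKey b) : a = b := by
  have h1 : a.1 = b.1 := congrArg (fun x => (ofLex x).1) h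
  have h2 : a.2.1 = b.2.1 := congrArg (fun x => (ofLex ((ofLex x).2)).1) h
  have h3 : a.2.2 = b.2.2 := congrArg (fun x => (ofLex ((ofLex x).2)).2) h
  exact Prod.ext h1 (Prod.ext h2 h3)

theorem pvCeilHalf_nonneg_sub (m : Nat) : 0 ≤ (m : Int) - pvCeilHalf (m : Int) := by
  have hc : pvCeilHalf (m : Int) = (((m + 1) / 2 : Nat) : Int) := by
    rw [pvCeilHalf]
    have h1 : ((m : Int) + 1) = ((m + 1 : Nat) : Int) := by push_cast; ring
    rw [h1]
    exact_mod_cast PySem.Int.floordiv_natCast (m + 1) 2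
  rw [hc]
  have h2 : (m + 1) / 2 ≤ m := by omega
  omega

theorem pvTrimLoop_eq_dropTwo (l : List (Int × Int × String)) : pvTrimLoop l = pvDropTwo l := by
  induction l with
  | nil => simp [pvTrimLoop, pvDropTwo]
  | cons x t ih =>
    rw [pvTrimLoop]
    simp only [PySem.List.remove?_cons_self, Option.getD_some]
    by_cases h : t.length + 1 > 2
    · rw [if_pos h, ih, pvDropTwo, pvDropTwo]
      have h2 : (x :: t).length - 2 = (t.length - 2) + 1 := by simp; omega
      rw [h2, List.drop_succ_cons]
    · rw [if_neg h, pvDropTwo]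
      have h0 : (x :: t).length - 2 = 0 := by simp; omega
      rw [h0, List.drop_zero]

theorem pvLength_insertBy (before : (Int × Int × String) → (Int × Int × String) → Bool)
    (t : Int × Int × String) (l : List (Int × Int × String)) :
    (PySem.List.insertBy before t l).length = l.length + 1 := by
  induction l with
  | nil => rfl
  | cons y r ih =>
    rw [PySem.List.insertBy]
    by_cases h : before t y <;> simp [h, ih]

-- every element of l is strictly above t: the stable insertion puts t in front
theorem pvInsertBy_all_gt (t : Int × Int × String) (l : List (Int × Int × String))
    (h : ∀ z ∈ l, pvKey t < pvKey z) :
    PySem.List.insertBy (fun a b => decide (pvKey a < pvKey b)) t l = t :: l := by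
  cases l with
  | nil => rfl
  | cons y r =>
    rw [PySem.List.insertBy]
    simp [h y (by simp)]

-- with no key ties, B's insert-before-equals coincides with sorted's insert-after-equals
theorem pvInsertPos_eq_insertBy (t : Int × Int × String) (l : List (Int × Int × String))
    (h : ∀ y ∈ l, pvKey y ≠ pvKey t) :
    pvInsertPos t l = PySem.List.insertBy (fun a b => decide (pvKey a < pvKey b)) t l := by
  induction l with
  | nil => rfl
  | cons y r ih =>
    rw [pvInsertPos, PySem.List.insertBy]
    have hne : pvKey y ≠ pvKey t := h y (by simp)
    rcases lt_trichotomy (pvKey y) (pvKey t) with hlt | heq | hgt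
    · simp only [pvLt, hlt, decide_true, if_true, not_lt.mpr hlt.le, decide_false,
        Bool.false_eq_true, if_false]
      rw [ih (fun z hz => h z (by simp [hz]))]
    · exact absurd heq hne
    · simp [pvLt, hgt, not_lt.mpr hgt.le]

-- an insertion into an already-sorted list is sorting the list with the element appended
theorem pvInsertBy_eq_sorted (t : Int × Int × String) (l : List (Int × Int × String))
    (hs : l.Pairwise (fun a b => pvKey a ≤ pvKey b)) :
    PySem.List.insertBy (fun a b => decide (pvKey a < pvKey b)) t l
      = PySem.List.sorted (l ++ [t]) pvKey false := by
  rw [PySem.List.sorted_eq_foldl_insertBy, List.foldl_append]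
  simp only [List.foldl_cons, List.foldl_nil]
  rw [← PySem.List.sorted_eq_foldl_insertBy, PySem.List.sorted_eq_self_of_pairwise l pvKey hs]

theorem pvTrim2_eq_dropTwo_of_le (l : List (Int × Int × String)) (h : l.length ≤ 3) :
    pvTrim2 l = pvDropTwo l := by
  rw [pvTrim2, pvDropTwo]
  by_cases h2 : l.length > 2
  · rw [if_pos h2]; congr 1; omega
  · rw [if_neg h2]
    have : l.length - 2 = 0 := by omega
    simp [this]

-- KEY: trimming commutes with sorted insertion on a sorted, tie-free list
theorem pvKeyLemma (t : Int × Int × String) (l : List (Int × Int × String))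
    (hs : l.Pairwise (fun a b => pvKey a ≤ pvKey b))
    (hne : ∀ y ∈ l, pvKey y ≠ pvKey t) :
    pvTrim2 (PySem.List.insertBy (fun a b => decide (pvKey a < pvKey b)) t (pvDropTwo l))
      = pvDropTwo (PySem.List.insertBy (fun a b => decide (pvKey a < pvKey b)) t l) := by
  induction l with
  | nil =>
    simp [pvDropTwo, pvTrim2, PySem.List.insertBy]
  | cons y r ih =>
    by_cases hlen : r.length ≥ 2
    · -- l has length ≥ 3
      have hdrop : pvDropTwo (y :: r) = pvDropTwo r := by
        rw [pvDropTwo, pvDropTwo]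
        have : (y :: r).length - 2 = (r.length - 2) + 1 := by simp; omega
        rw [this, List.drop_succ_cons]
      rw [hdrop]
      rw [PySem.List.insertBy]
      by_cases hc : pvKey t < pvKey y
      · -- t goes to the very front; the last two elements are untouched
        simp only [decide_eq_true_eq, hc, if_true]
        have hall : ∀ z ∈ r, pvKey t < pvKey z := by
          intro z hz
          exact lt_of_lt_of_le hc ((List.pairwise_cons.mp hs).1 z hz)
        have hdl : PySem.List.insertBy (fun a b => decide (pvKey a < pvKey b)) t (pvDropTwo r)
            = t :: pvDropTwo r := by
          apply pvInsertBy_all_gt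
          intro z hz
          exact hall z (List.mem_of_mem_drop hz)
        rw [hdl, pvTrim2]
        have hlen2 : (pvDropTwo r).length = 2 := by
          simp only [pvDropTwo, List.length_drop]; omega
        rw [if_pos (by simp [hlen2]), List.drop_one, List.tail_cons]
        -- right side: drop ((r.length+2)-2) (t :: y :: r) = the last two of r
        simp only [pvDropTwo]
        have h3 : (t :: y :: r).length - 2 = ((r.length - 2) + 1) + 1 := by simp; omega
        rw [h3, List.drop_succ_cons, List.drop_succ_cons]
      · simp only [decide_eq_true_eq, hc, if_false]
        have htl : pvDropTwo (y :: PySem.List.insertBy (fun a b => decide (pvKey a < pvKey b)) t r)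
            = pvDropTwo (PySem.List.insertBy (fun a b => decide (pvKey a < pvKey b)) t r) := by
          rw [pvDropTwo, pvDropTwo, pvLength_insertBy]
          have : (y :: PySem.List.insertBy (fun a b => decide (pvKey a < pvKey b)) t r).length - 2
              = ((r.length + 1) - 2) + 1 := by simp [pvLength_insertBy]; omega
          rw [this, List.drop_succ_cons]
        rw [htl]
        exact ih (List.pairwise_cons.mp hs).2 (fun z hz => hne z (by simp [hz]))
    · -- l has length ≤ 2 : pvDropTwo l = l and both sides trim a list of length ≤ 3
      have hd : pvDropTwo (y :: r) = y :: r := by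
        rw [pvDropTwo]
        have h0 : (y :: r).length - 2 = 0 := by simp; omega
        rw [h0, List.drop_zero]
      rw [hd]
      apply pvTrim2_eq_dropTwo_of_le
      rw [pvLength_insertBy]; simp; omega

-- the streaming top-2 fold computes drop-to-two of the insertion-sort fold
theorem pvFold_eq (ts : List (Int × Int × String)) :
    ∀ l : List (Int × Int × String),
    l.Pairwise (fun a b => pvKey a ≤ pvKey b) →
    (∀ x ∈ ts, ∀ y ∈ l, pvKey y ≠ pvKey x) →
    ts.Pairwise (fun a b => pvKey a ≠ pvKey b) →
    ts.foldl (fun best t => pvTrim2 (pvInsertPos t best)) (pvDropTwo l)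
      = pvDropTwo (ts.foldl (fun acc x =>
          PySem.List.insertBy (fun a b => decide (pvKey a < pvKey b)) x acc) l) := by
  induction ts with
  | nil => intro l _ _ _; rfl
  | cons t ts' ih =>
    intro l hs hne hnd
    simp only [List.foldl_cons]
    have h1 : pvInsertPos t (pvDropTwo l)
        = PySem.List.insertBy (fun a b => decide (pvKey a < pvKey b)) t (pvDropTwo l) := by
      apply pvInsertPos_eq_insertBy
      intro y hy
      exact hne t (by simp) y (List.mem_of_mem_drop hy)
    rw [h1, pvKeyLemma t l hs (fun y hy => hne t (by simp) y hy)]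
    apply ih
    · have := pvInsertBy_eq_sorted t l hs
      rw [this]
      exact PySem.List.sorted_pairwise _ _
    · intro x hx y hy
      rcases (PySem.List.mem_insertBy _ t y l).mp hy with h | h
      · subst h
        exact (List.pairwise_cons.mp hnd).1 x hx
      · exact hne x (by simp [hx]) y h
    · exact (List.pairwise_cons.mp hnd).2

theorem pvGetD_mk (graph : List (String × List String)) (kv : String × List String)
    (hmem : kv ∈ graph) (hnd : (graph.map Prod.fst).Nodup) :
    (PySem.Dict.mk graph).getD kv.1 [] = kv.2 := by
  have hm : (kv.1, kv.2) ∈ (PySem.Dict.mk graph).items := by simpa using hmem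
  have hk : (PySem.Dict.mk graph).keys.Nodup := by simpa [PySem.Dict.keys] using hnd
  exact PySem.Dict.getD_of_mem_items (PySem.Dict.mk graph) hm hk []

-- A's candidate list is graph.map pvVal (the dict detour resolved, the ≥ 0 filter vacuous)
theorem pvA_cand (graph : List (String × List String)) (hnd : (graph.map Prod.fst).Nodup) :
    find_influencers graph = pvTrimLoop (PySem.List.sorted (graph.map pvVal) pvKey false) := by
  have h1 : List.foldl
      (fun (d : PySem.Dict String Int) (kv : String × List String) =>
        d.insert kv.1 ((((PySem.Dict.mk graph).getD kv.1 []).length : Int)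
          - pvCeilHalf (((PySem.Dict.mk graph).getD kv.1 []).length : Int)))
      PySem.Dict.empty graph
      = List.foldl (fun (d : PySem.Dict String Int) (kv : String × List String) =>
          d.insert kv.1 ((kv.2.length : Int) - pvCeilHalf (kv.2.length : Int)))
          PySem.Dict.empty graph :=
    PySem.List.foldl_congr_mem graph _ _ _ (by
      intro acc kv hkv
      rw [pvGetD_mk graph kv hkv hnd])
  have h2 : (List.foldl (fun (d : PySem.Dict String Int) (kv : String × List String) =>
        d.insert kv.1 ((kv.2.length : Int) - pvCeilHalf (kv.2.length : Int)))
        PySem.Dict.empty graph).items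
      = graph.map (fun kv => (kv.1, (kv.2.length : Int) - pvCeilHalf (kv.2.length : Int))) := by
    have h := PySem.Dict.items_foldl_insert_fresh (ν := Int) graph Prod.fst
      (fun kv => ((kv.2.length : Int) - pvCeilHalf (kv.2.length : Int)))
      PySem.Dict.empty (fun a _ => PySem.Dict.contains_empty a.1) hnd
    simpa [PySem.Dict.empty] using h
  have h3 : List.foldl (fun (acc : List (Int × Int × String)) (kv : String × Int) =>
        if kv.2 ≥ 0 then
          acc ++ [(kv.2, (((PySem.Dict.mk graph).getD kv.1 []).length : Int), kv.1)]
        else acc)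
      [] (graph.map (fun kv => (kv.1, (kv.2.length : Int) - pvCeilHalf (kv.2.length : Int))))
      = graph.map pvVal := by
    rw [List.foldl_map]
    rw [PySem.List.foldl_congr_mem graph _
      (fun (acc : List (Int × Int × String)) (kv : String × List String) => acc ++ [pvVal kv]) []
      (by
        intro acc kv hkv
        show (if ((kv.2.length : Int) - pvCeilHalf (kv.2.length : Int)) ≥ 0 then
            acc ++ [((kv.2.length : Int) - pvCeilHalf (kv.2.length : Int),
              (((PySem.Dict.mk graph).getD kv.1 []).length : Int), kv.1)] else acc)
          = acc ++ [pvVal kv]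
        rw [if_pos (pvCeilHalf_nonneg_sub kv.2.length), pvGetD_mk graph kv hkv hnd, pvVal])]
    rw [PySem.List.foldl_append_singleton_eq_map, List.nil_append]
  rw [find_influencers, h1, h2, h3]

theorem pvB_eq (graph : List (String × List String)) (hnd : (graph.map Prod.fst).Nodup) :
    find_influencers_alt graph
      = (graph.map pvVal).foldl (fun best t => pvTrim2 (pvInsertPos t best)) [] := by
  rw [find_influencers_alt, List.foldl_map]
  apply PySem.List.foldl_congr_mem
  intro acc kv hkv
  rw [pvGetD_mk graph kv hkv hnd]
  rfl

theorem pvTs_pairwise_ne (graph : List (String × List String))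
    (hnd : (graph.map Prod.fst).Nodup) :
    (graph.map pvVal).Pairwise (fun a b => pvKey a ≠ pvKey b) := by
  rw [List.pairwise_map]
  have h := (List.pairwise_map.mp hnd)
  apply h.imp
  intro a b hab hk
  exact hab (congrArg (fun t => t.2.2) (pvKey_inj hk))

-- ===== VERDICT (by name: the statement is the Claim_ definition above) =====
theorem find_influencers_spec : Claim_equal_find_influencers := by
  intro graph _ hpre
  unfold Spec_find_influencers
  have hnd : (graph.map Prod.fst).Nodup := hpre
  rw [pvA_cand graph hnd, pvB_eq graph hnd, pvTrimLoop_eq_dropTwo]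
  have h0 : ([] : List (Int × Int × String)) = pvDropTwo [] := rfl
  rw [h0, pvFold_eq (graph.map pvVal) [] (by simp) (by simp) (pvTs_pairwise_ne graph hnd)]
  rw [PySem.List.sorted_eq_foldl_insertBy]
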